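-- pv_equiv track=rewrite | github.com/HaneulJung/Programmers | Lv. 2/조이스틱.py | solution
-- ===== SOURCE A (Python) =====
-- def solution(name):
--     alpha = ["A","B","C","D","E","F","G","H","I","J","K","L","M","N","O","P","Q","R","S","T","U","V","W","X","Y","Z"]
--
--     answer = 0
--
--     for i in range(len(name)):
--         temp = alpha.index(name[i])
--         answer += min(temp, 26 - temp)
--
--     pos = 1
--     temp = []
--     while pos < len(name):
--         if name[pos] == "A":
--             s = pos
--             c = 0
--             while pos < len(name):
--                 if name[pos] == "A":
--                     pos += 1
--                     c += 1
--                 else: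
--                     break
--             temp.append([s, c])
--         pos += 1
--
--     m = len(name) - 1
--     for t in temp:
--         a = (t[0]-1)*2 + len(name) - (t[0] + t[1])
--         b = (len(name) - (t[0] + t[1]))*2 + t[0]-1
--
--         m = min([m, a, b])
--
--     answer += m
--
--     return answer
-- ===== SOURCE B (Python) =====
-- def solution(name):
--     n = len(name)
--     answer = sum(min(ord(ch) - 65, 91 - ord(ch)) for ch in name)
--     move = n - 1
--     i = 0
--     while i < n:
--         nxt = i + 1
--         while nxt < n and name[nxt] == 'A':
--             nxt += 1
--         move = min(move, i * 2 + (n - nxt), (n - nxt) * 2 + i)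
--         i += 1
--     return answer + move
-- ===== Notes on version B (the rewrite author's own statement) =====
-- stated objective: simpler
-- what changed: The two-phase horizontal part (first build a table of A-runs with nested while loops and mutated scan position, then a second fold over that table) is replaced by a single inline scan that, for every index i, looks ahead past the A-run starting at i+1 and updates the running minimum directly, so the run table disappears; the vertical sum is computed per character from its code point instead of scanning a 26-element alphabet list with .index.
import Mathlib
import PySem

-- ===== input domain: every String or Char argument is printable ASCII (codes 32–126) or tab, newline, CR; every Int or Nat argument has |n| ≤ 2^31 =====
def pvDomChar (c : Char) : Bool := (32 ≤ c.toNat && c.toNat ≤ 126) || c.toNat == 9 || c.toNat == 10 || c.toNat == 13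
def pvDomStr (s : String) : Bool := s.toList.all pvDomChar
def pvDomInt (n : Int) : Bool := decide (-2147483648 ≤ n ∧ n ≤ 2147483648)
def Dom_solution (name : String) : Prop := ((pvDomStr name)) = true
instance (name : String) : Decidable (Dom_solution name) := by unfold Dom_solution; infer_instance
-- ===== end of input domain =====

-- B replaces A's two-phase horizontal computation (run-table construction + fold) by one inline scan,
-- and computes the vertical cost from the character code instead of alpha.index. (objective: simpler)

-- ===== PORT A =====
def pvAlpha : List Char := ['A','B','C','D','E','F','G','H','I','J','K','L','M','N','O','P','Q','R','S','T','U','V','W','X','Y','Z']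

-- inner 'while pos < len(name): if name[pos]=="A": pos += 1; c += 1 else: break'
def pvInnerA (cs : List Char) (pos c : Nat) : Nat × Nat :=
  if h : pos < cs.length then
    if cs[pos] = 'A' then pvInnerA cs (pos + 1) (c + 1) else (pos, c)
  else (pos, c)
termination_by cs.length - pos

-- termination helper for the outer while loop (pos only grows)
theorem pvInnerA_ge (cs : List Char) (pos c : Nat) : pos ≤ (pvInnerA cs pos c).1 := by
  fun_induction pvInnerA cs pos c with
  | case1 _ _ _ _ ih => omega
  | case2 => simp
  | case3 => simp

-- outer 'while pos < len(name): …' building temp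
def pvOuterA (cs : List Char) (pos : Nat) (temp : List (Nat × Nat)) : List (Nat × Nat) :=
  if h : pos < cs.length then
    if cs[pos] = 'A' then
      let r := pvInnerA cs pos 0
      pvOuterA cs (r.1 + 1) (temp ++ [(pos, r.2)])
    else pvOuterA cs (pos + 1) temp
  else temp
termination_by cs.length - pos
decreasing_by
  · have := pvInnerA_ge cs pos 0; omega
  · omega

def solution (name : String) : Int :=
  let cs := name.toList
  let n : Int := PySem.Str.len name
  -- answer += min(temp, 26 - temp) over alpha.index(name[i]) (.getD defaults are never used: range(len) indices are in range, and Pre_ excludes the ValueError of .index)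
  let answer : Int := (PySem.List.pyRange 0 n 1).foldl
    (fun acc i =>
      let temp : Int := (((PySem.List.index? pvAlpha (PySem.List.pyGetD cs i ' ')).getD 0 : Nat) : Int)
      acc + min temp (26 - temp)) 0
  let temp := pvOuterA cs 1 []
  -- m = min([m, a, b]) over temp
  let m : Int := temp.foldl
    (fun m t =>
      let a : Int := ((t.1 : Int) - 1) * 2 + n - ((t.1 : Int) + (t.2 : Int))
      let b : Int := (n - ((t.1 : Int) + (t.2 : Int))) * 2 + (t.1 : Int) - 1
      min (min m a) b) (n - 1)
  answer + m

-- ===== PORT B =====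
-- 'nxt = i+1; while nxt < n and name[nxt] == "A": nxt += 1'
def pvInnerB (cs : List Char) (nxt : Nat) : Nat :=
  if h : nxt < cs.length then
    if cs[nxt] = 'A' then pvInnerB cs (nxt + 1) else nxt
  else nxt
termination_by cs.length - nxt

-- 'while i < n: … move = min(move, i*2 + (n-nxt), (n-nxt)*2 + i); i += 1'
def pvLoopB (cs : List Char) (i : Nat) (move : Int) : Int :=
  if i < cs.length then
    let nxt := pvInnerB cs (i + 1)
    pvLoopB cs (i + 1)
      (min (min move ((i : Int) * 2 + ((cs.length : Int) - (nxt : Int))))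
        (((cs.length : Int) - (nxt : Int)) * 2 + (i : Int)))
  else move
termination_by cs.length - i

def solution_alt (name : String) : Int :=
  let cs := name.toList
  let n : Int := (cs.length : Int)
  let answer : Int := (cs.map (fun ch => min ((ch.toNat : Int) - 65) (91 - (ch.toNat : Int)))).sum
  answer + pvLoopB cs 0 (n - 1)

-- ===== PRECONDITION & SPEC =====
-- Pre_ excludes exactly the names containing a character that is not an uppercase ASCII letter (code 65..90): there A's alpha.index raises ValueError.
def Pre_solution (name : String) : Prop := (name.toList.all (fun c => 65 ≤ c.toNat && c.toNat ≤ 90)) = true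
instance (name : String) : Decidable (Pre_solution name) := by unfold Pre_solution; infer_instance
def pvWitness_solution : String := "BAAB"

def Spec_solution (name : String) (out : Int) : Prop := out = solution_alt name
instance (name : String) (out : Int) : Decidable (Spec_solution name out) := by unfold Spec_solution; infer_instance

-- ===== CLAIM (what is proved, stated in full; the proofs are below) =====
def Claim_equal_solution : Prop := ∀ (name : String), Dom_solution name → Pre_solution name → Spec_solution name (solution name)


-- ===== LEMMAS AND PROOFS =====

-- proof-side abbreviations for A's run costs and min-fold
def pvCostA (n : Int) (t : Nat × Nat) : Int := ((t.1 : Int) - 1) * 2 + n - ((t.1 : Int) + (t.2 : Int))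
def pvCostB (n : Int) (t : Nat × Nat) : Int := (n - ((t.1 : Int) + (t.2 : Int))) * 2 + (t.1 : Int) - 1
def pvFoldM (n : Int) (l : List (Nat × Nat)) (m : Int) : Int :=
  l.foldl (fun m t => min (min m (pvCostA n t)) (pvCostB n t)) m

-- innerB facts
theorem pvInnerB_ge (cs : List Char) (p : Nat) : p ≤ pvInnerB cs p := by
  fun_induction pvInnerB cs p <;> omega

theorem pvInnerB_eq_self (cs : List Char) (p : Nat)
    (h : ¬ (p < cs.length ∧ cs[p]? = some 'A')) : pvInnerB cs p = p := by
  rw [pvInnerB]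
  split_ifs with h1 h2
  · exact absurd ⟨h1, by simp [List.getElem?_eq_getElem h1, h2]⟩ h
  · rfl
  · rfl

theorem pvInnerB_not_A (cs : List Char) (p : Nat) :
    pvInnerB cs p < cs.length → cs[pvInnerB cs p]? ≠ some 'A' := by
  fun_induction pvInnerB cs p with
  | case1 p h hA ih => exact ih
  | case2 p h hA => intro _ hc; rw [List.getElem?_eq_getElem h] at hc; exact hA (by injection hc)
  | case3 p h => intro hc; omega

theorem pvInnerB_idem (cs : List Char) (p : Nat) :
    ∀ q, p ≤ q → q ≤ pvInnerB cs p → pvInnerB cs q = pvInnerB cs p := by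
  fun_induction pvInnerB cs p with
  | case1 p h hA ih =>
      intro q hq1 hq2
      rcases Nat.eq_or_lt_of_le hq1 with rfl | hlt
      · conv_lhs => rw [pvInnerB]
        simp [h, hA]
      · exact ih q hlt hq2
  | case2 p h hA =>
      intro q hq1 hq2
      have hq : q = p := by omega
      subst hq; rw [pvInnerB]; simp [h, hA]
  | case3 p h =>
      intro q hq1 hq2
      have hq : q = p := by omega
      subst hq; rw [pvInnerB]; simp [h]

theorem pvInnerA_eq (cs : List Char) (p c : Nat) :
    pvInnerA cs p c = (pvInnerB cs p, c + (pvInnerB cs p - p)) := by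
  fun_induction pvInnerA cs p c with
  | case1 p c h hA ih =>
      rw [ih]
      have h1 : p + 1 ≤ pvInnerB cs (p + 1) := pvInnerB_ge cs (p + 1)
      have h2 : pvInnerB cs p = pvInnerB cs (p + 1) := by
        conv_lhs => rw [pvInnerB]
        simp [h, hA]
      rw [h2]
      have : c + 1 + (pvInnerB cs (p + 1) - (p + 1)) = c + (pvInnerB cs (p + 1) - p) := by omega
      rw [this]
  | case2 p c h hA =>
      have : pvInnerB cs p = p := by rw [pvInnerB]; simp [h, hA]
      simp [this]
  | case3 p c h =>
      have : pvInnerB cs p = p := by rw [pvInnerB]; simp [h]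
      simp [this]

-- loopB facts
theorem pvLoopB_le (cs : List Char) (i : Nat) (m : Int) : pvLoopB cs i m ≤ m := by
  fun_induction pvLoopB cs i m with
  | case1 i m h nxt ih => calc pvLoopB cs (i+1) _ ≤ _ := ih
                           _ ≤ m := by omega
  | case2 i m h => omega

theorem pvLoopB_le_g (cs : List Char) (i : Nat) (m : Int) :
    ∀ j, i ≤ j → j < cs.length →
      pvLoopB cs i m ≤ (j : Int) * 2 + ((cs.length : Int) - (pvInnerB cs (j + 1) : Int)) ∧
      pvLoopB cs i m ≤ ((cs.length : Int) - (pvInnerB cs (j + 1) : Int)) * 2 + (j : Int) := by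
  fun_induction pvLoopB cs i m with
  | case1 i m h nxt ih =>
      intro j hj1 hj2
      rcases Nat.eq_or_lt_of_le hj1 with rfl | hlt
      · have hnxt : nxt = pvInnerB cs (i + 1) := rfl
        have := pvLoopB_le cs (i + 1)
          (min (min m ((i : Int) * 2 + ((cs.length : Int) - (nxt : Int))))
            (((cs.length : Int) - (nxt : Int)) * 2 + (i : Int)))
        simp only [← hnxt] at this ⊢
        constructor <;> omega
      · exact ih j hlt hj2
  | case2 i m h => intro j hj1 hj2; omega

theorem pvLoopB_ge (cs : List Char) (i : Nat) (m : Int) (x : Int) :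
    x ≤ m →
    (∀ j, i ≤ j → j < cs.length →
      x ≤ (j : Int) * 2 + ((cs.length : Int) - (pvInnerB cs (j + 1) : Int)) ∧
      x ≤ ((cs.length : Int) - (pvInnerB cs (j + 1) : Int)) * 2 + (j : Int)) →
    x ≤ pvLoopB cs i m := by
  fun_induction pvLoopB cs i m with
  | case1 i m h nxt ih =>
      intro hm hg
      apply ih
      · have := hg i (le_refl i) h
        omega
      · intro j hj1 hj2; exact hg j (by omega) hj2
  | case2 i m h => intro hm hg; exact hm

-- A's min-fold facts
theorem pvFoldM_le_init (n : Int) (l : List (Nat × Nat)) : ∀ m, pvFoldM n l m ≤ m := by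
  induction l with
  | nil => intro m; simp [pvFoldM]
  | cons t l ih =>
      intro m
      have := ih (min (min m (pvCostA n t)) (pvCostB n t))
      simp only [pvFoldM, List.foldl_cons] at *
      omega

theorem pvFoldM_le_mem (n : Int) (l : List (Nat × Nat)) :
    ∀ m, ∀ t ∈ l, pvFoldM n l m ≤ pvCostA n t ∧ pvFoldM n l m ≤ pvCostB n t := by
  induction l with
  | nil => intro m t ht; simp at ht
  | cons u l ih =>
      intro m t ht
      rcases List.mem_cons.mp ht with rfl | ht
      · have := pvFoldM_le_init n l (min (min m (pvCostA n t)) (pvCostB n t))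
        simp only [pvFoldM, List.foldl_cons] at *
        omega
      · have := ih (min (min m (pvCostA n u)) (pvCostB n u)) t ht
        simp only [pvFoldM, List.foldl_cons] at *
        omega

theorem pvFoldM_ge (n : Int) (l : List (Nat × Nat)) (x : Int) :
    ∀ m, x ≤ m → (∀ t ∈ l, x ≤ pvCostA n t ∧ x ≤ pvCostB n t) → x ≤ pvFoldM n l m := by
  induction l with
  | nil => intro m hm _; simpa [pvFoldM] using hm
  | cons u l ih =>
      intro m hm hl
      have hu := hl u (List.mem_cons_self)
      have := ih (min (min m (pvCostA n u)) (pvCostB n u)) (by omega)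
        (fun t ht => hl t (List.mem_cons_of_mem _ ht))
      simpa [pvFoldM, List.foldl_cons] using this

-- outerA facts
theorem pvOuterA_acc_sub (cs : List Char) (pos : Nat) (temp : List (Nat × Nat)) :
    ∀ x ∈ temp, x ∈ pvOuterA cs pos temp := by
  fun_induction pvOuterA cs pos temp with
  | case1 pos temp h hA r ih =>
      intro x hx; exact ih x (List.mem_append_left _ hx)
  | case2 pos temp h hA ih => intro x hx; exact ih x hx
  | case3 pos temp h => intro x hx; exact hx

theorem pvOuterA_mem (cs : List Char) (pos : Nat) (temp : List (Nat × Nat)) :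
    ∀ x ∈ pvOuterA cs pos temp, x ∈ temp ∨
      (pos ≤ x.1 ∧ x.1 < cs.length ∧ cs[x.1]? = some 'A' ∧ x.1 + x.2 = pvInnerB cs x.1) := by
  fun_induction pvOuterA cs pos temp with
  | case1 pos temp h hA r ih =>
      have hr : r = (pvInnerB cs pos, 0 + (pvInnerB cs pos - pos)) := pvInnerA_eq cs pos 0
      have hr1 : r.1 = pvInnerB cs pos := by rw [hr]
      have hr2 : r.2 = 0 + (pvInnerB cs pos - pos) := by rw [hr]
      have hge := pvInnerB_ge cs pos
      intro x hx
      rcases ih x hx with hx' | hx'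
      · rcases List.mem_append.mp hx' with hx'' | hx''
        · exact Or.inl hx''
        · right
          have hx3 : x = (pos, r.2) := by simpa using hx''
          subst hx3
          exact ⟨le_refl _, h, by rw [List.getElem?_eq_getElem h, hA], by simp only; omega⟩
      · exact Or.inr ⟨by omega, hx'.2.1, hx'.2.2.1, hx'.2.2.2⟩
  | case2 pos temp h hA ih =>
      intro x hx
      rcases ih x hx with hx' | hx'
      · exact Or.inl hx'
      · exact Or.inr ⟨by omega, hx'.2.1, hx'.2.2.1, hx'.2.2.2⟩
  | case3 pos temp h => intro x hx; exact Or.inl hx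

theorem pvOuterA_cover (cs : List Char) (pos : Nat) (temp : List (Nat × Nat)) :
    ∀ j, pos ≤ j → j < cs.length → cs[j]? = some 'A' →
      ∃ t ∈ pvOuterA cs pos temp, t.1 ≤ j ∧ j < t.1 + t.2 := by
  fun_induction pvOuterA cs pos temp with
  | case1 pos temp h hA r ih =>
      have hr : r = (pvInnerB cs pos, 0 + (pvInnerB cs pos - pos)) := pvInnerA_eq cs pos 0
      have hr1 : r.1 = pvInnerB cs pos := by rw [hr]
      have hr2 : r.2 = 0 + (pvInnerB cs pos - pos) := by rw [hr]
      have hge := pvInnerB_ge cs pos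
      intro j hj1 hj2 hjA
      by_cases hcase : j < pvInnerB cs pos
      · exact ⟨(pos, r.2),
          pvOuterA_acc_sub cs (r.1 + 1) _ _ (List.mem_append_right _ (by simp)),
          by simpa using hj1, by simp only; omega⟩
      · have hne : j ≠ pvInnerB cs pos := by
          intro hj
          exact pvInnerB_not_A cs pos (by omega) (by rw [← hj]; exact hjA)
        exact ih j (by omega) hj2 hjA
  | case2 pos temp h hA ih =>
      intro j hj1 hj2 hjA
      apply ih j ?_ hj2 hjA
      rcases Nat.eq_or_lt_of_le hj1 with rfl | hlt
      · rw [List.getElem?_eq_getElem h] at hjA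
        exact absurd (by injection hjA) hA
      · omega
  | case3 pos temp h => intro j hj1 hj2 hjA; omega

-- the alphabet index of an uppercase letter is its code point minus 65
theorem pvIdxAlpha (c : Char) (h1 : 65 ≤ c.toNat) (h2 : c.toNat ≤ 90) :
    PySem.List.index? pvAlpha c = some (c.toNat - 65) := by
  have key : ∀ k, 65 ≤ k → k ≤ 90 → ∀ c' : Char, c' = Char.ofNat k →
      PySem.List.index? pvAlpha c' = some (k - 65) := by
    intro k hk1 hk2 c' hc'
    subst hc'
    interval_cases k <;> decide
  exact key c.toNat h1 h2 c (Char.ofNat_toNat c).symm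

-- vertical sums agree on uppercase input
theorem pvVert (name : String) (h : ∀ c ∈ name.toList, 65 ≤ c.toNat ∧ c.toNat ≤ 90) :
    (PySem.List.pyRange 0 (PySem.Str.len name) 1).foldl
      (fun acc i =>
        let temp : Int := (((PySem.List.index? pvAlpha (PySem.List.pyGetD name.toList i ' ')).getD 0 : Nat) : Int)
        acc + min temp (26 - temp)) 0
      = (name.toList.map (fun ch => min ((ch.toNat : Int) - 65) (91 - (ch.toNat : Int)))).sum := by
  rw [show PySem.Str.len name = (name.toList.length : Int) from rfl]
  rw [PySem.List.foldl_pyRange_zero_pyGetD' name.toList ' '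
    (fun acc c =>
      let temp : Int := (((PySem.List.index? pvAlpha c).getD 0 : Nat) : Int)
      acc + min temp (26 - temp)) 0]
  have hc := PySem.List.foldl_congr_mem (l := name.toList) (init := (0 : Int))
    (f := fun acc c =>
      let temp : Int := (((PySem.List.index? pvAlpha c).getD 0 : Nat) : Int)
      acc + min temp (26 - temp))
    (g := fun acc ch => acc + min ((ch.toNat : Int) - 65) (91 - (ch.toNat : Int)))
    (by
      intro acc c hcm
      obtain ⟨h1, h2⟩ := h c hcm
      simp only [pvIdxAlpha c h1 h2, Option.getD_some]
      have hcast : ((c.toNat - 65 : Nat) : Int) = (c.toNat : Int) - 65 := by omega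
      rw [hcast]
      omega)
  rw [hc, PySem.List.foldl_add]
  simp

-- horizontal minima agree
theorem pvHoriz (cs : List Char) :
    pvFoldM (cs.length : Int) (pvOuterA cs 1 []) ((cs.length : Int) - 1)
      = pvLoopB cs 0 ((cs.length : Int) - 1) := by
  apply le_antisymm
  · apply pvLoopB_ge
    · exact pvFoldM_le_init _ _ _
    · intro j _ hj2
      by_cases hA : j + 1 < cs.length ∧ cs[j + 1]? = some 'A'
      · obtain ⟨t, ht, ht1, ht2⟩ := pvOuterA_cover cs 1 [] (j + 1) (by omega) hA.1 hA.2
        rcases pvOuterA_mem cs 1 [] t ht with h0 | ⟨hp1, hp2, hpA, hpe⟩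
        · simp at h0
        · have hidem : pvInnerB cs (j + 1) = pvInnerB cs t.1 :=
            pvInnerB_idem cs t.1 (j + 1) ht1 (by omega)
          have hmem := pvFoldM_le_mem (cs.length : Int) (pvOuterA cs 1 []) ((cs.length : Int) - 1) t ht
          unfold pvCostA pvCostB at hmem
          constructor <;> omega
      · have he : pvInnerB cs (j + 1) = j + 1 := pvInnerB_eq_self cs (j + 1) hA
        have hinit := pvFoldM_le_init (cs.length : Int) (pvOuterA cs 1 []) ((cs.length : Int) - 1)
        rw [he]
        constructor <;> omega
  · apply pvFoldM_ge
    · exact pvLoopB_le _ _ _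
    · intro t ht
      rcases pvOuterA_mem cs 1 [] t ht with h0 | ⟨hp1, hp2, hpA, hpe⟩
      · simp at h0
      · have hj := pvLoopB_le_g cs 0 ((cs.length : Int) - 1) (t.1 - 1) (by omega) (by omega)
        have hs : t.1 - 1 + 1 = t.1 := by omega
        rw [hs] at hj
        unfold pvCostA pvCostB
        constructor <;> omega

-- ===== VERDICT (by name: the statement is the Claim_ definition above) =====
theorem solution_spec : Claim_equal_solution := by
  intro name _ hpre
  have hpre' : ∀ c ∈ name.toList, 65 ≤ c.toNat ∧ c.toNat ≤ 90 := by
    intro c hc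
    simpa using List.all_eq_true.mp hpre c hc
  unfold Spec_solution
  have hA : solution name =
      (PySem.List.pyRange 0 (PySem.Str.len name) 1).foldl
        (fun acc i =>
          let temp : Int := (((PySem.List.index? pvAlpha (PySem.List.pyGetD name.toList i ' ')).getD 0 : Nat) : Int)
          acc + min temp (26 - temp)) 0
      + pvFoldM (name.toList.length : Int) (pvOuterA name.toList 1 []) ((name.toList.length : Int) - 1) := rfl
  have hB : solution_alt name =
      (name.toList.map (fun ch => min ((ch.toNat : Int) - 65) (91 - (ch.toNat : Int)))).sum
      + pvLoopB name.toList 0 ((name.toList.length : Int) - 1) := rfl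
  rw [hA, hB, pvVert name hpre', pvHoriz]
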